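-- pv_equiv track=rewrite | github.com/liupengsay/PyIsTheBestLang | src/dp/bag_dp/template.py | group_bag_unlimited
-- ===== SOURCE A (Python) =====
-- import math
--
-- def group_bag_unlimited(nums):
--     # Calculate the number of solutions for decomposing n into the sum of squares of four numbers
--     n = max(nums)
--     dp = [[0] * 5 for _ in range(n + 1)]
--     dp[0][0] = 1
--     for i in range(1, int(math.sqrt(n)) + 1):
--         x = i * i
--         for j in range(x, n + 1):
--             for k in range(1, 5):
--                 if dp[j - x][k - 1]:
--                     dp[j][k] += dp[j - x][k - 1]
--     return [sum(dp[num]) for num in nums]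
-- ===== SOURCE B (Python) =====
-- import math
--
--
-- def group_bag_unlimited(nums):
--     # Direct enumeration of the decompositions themselves: every multiset of
--     # 1..4 positive squares is generated exactly once as a non-increasing
--     # chain a >= b >= c >= d, tallying its running sums into counts.
--     n = max(nums)
--     counts = [0] * (n + 1)
--     counts[0] = 1  # zero has exactly the empty decomposition
--
--     def emit(s, hi, k):
--         # tally every non-increasing chain of 1..k further positive squares
--         # (next part <= hi) appended onto a partial decomposition of sum s
--         if k == 0:
--             return
--         for a in range(1, min(hi, math.isqrt(n - s)) + 1):
--             t = s + a * a
--             counts[t] += 1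
--             emit(t, a, k - 1)
--
--     emit(0, math.isqrt(n), 4)
--     return [counts[num] for num in nums]
-- ===== Notes on version B (the rewrite author's own statement) =====
-- stated objective: alternative
-- what changed: B discards A's (n+1)x5 knapsack DP table and instead enumerates every decomposition once, as a non-increasing chain of 1..4 positive squares generated by a bounded recursive loop, tallying running sums into a 1-D counts array (0 seeded with the empty decomposition).
import Mathlib
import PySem

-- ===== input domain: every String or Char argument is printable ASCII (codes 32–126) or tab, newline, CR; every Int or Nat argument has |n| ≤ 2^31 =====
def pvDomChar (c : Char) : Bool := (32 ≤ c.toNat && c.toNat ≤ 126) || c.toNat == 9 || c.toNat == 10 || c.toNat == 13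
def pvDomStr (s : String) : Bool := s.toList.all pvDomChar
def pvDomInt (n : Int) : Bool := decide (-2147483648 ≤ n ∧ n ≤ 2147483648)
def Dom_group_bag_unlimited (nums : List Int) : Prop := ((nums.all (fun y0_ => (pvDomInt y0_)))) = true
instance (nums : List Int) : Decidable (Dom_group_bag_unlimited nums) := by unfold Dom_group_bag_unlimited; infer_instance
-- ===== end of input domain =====

-- B replaces A's 2-D knapsack DP table by a direct recursive enumeration of every
-- decomposition as a non-increasing chain of 1..4 positive squares (objective:
-- alternative algorithm; return value only, no argument is mutated).

-- ===== PORT A =====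
-- dp is a Python list of 5-element rows; ported as Array (List Int) so that the
-- in-place row assignment dp[j][k] += … is O(1) as in Python (values identical)
-- body of the innermost loop 'for k in range(1, 5)': dp[j][k] += dp[j-x][k-1] if dp[j-x][k-1]
-- (both indices are provably in range whenever this runs, so getD/setIfInBounds are exact)
def pvKStep (x j : Int) (dp : Array (List Int)) (k : Int) : Array (List Int) :=
  if (dp.getD (j - x).toNat []).getD (k - 1).toNat 0 ≠ 0 then
    dp.setIfInBounds j.toNat ((dp.getD j.toNat []).set k.toNat
      ((dp.getD j.toNat []).getD k.toNat 0 + (dp.getD (j - x).toNat []).getD (k - 1).toNat 0))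
  else dp

-- body of 'for j in range(x, n + 1)'
def pvJStep (x : Int) (dp : Array (List Int)) (j : Int) : Array (List Int) :=
  (PySem.List.pyRange 1 5 1).foldl (pvKStep x j) dp

-- body of 'for i in range(1, int(math.sqrt(n)) + 1)'
def pvIStep (n : Int) (dp : Array (List Int)) (i : Int) : Array (List Int) :=
  let x := i * i
  (PySem.List.pyRange x (n + 1) 1).foldl (pvJStep x) dp

-- dp = [[0]*5 for _ in range(n+1)]; dp[0][0] = 1
-- (for n < 0 the table is empty and Python's dp[0][0] raises IndexError: excluded by Pre_)
def pvDp0 (n : Int) : Array (List Int) :=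
  (Array.replicate (n + 1).toNat (List.replicate 5 (0 : Int))).setIfInBounds 0
    ((List.replicate 5 (0 : Int)).set 0 1)

-- the fully iterated table; int(math.sqrt(n)) = isqrt(n) exactly for every 0 ≤ n ≤ 2^31 (the Dom_ range)
def pvDpF (n : Int) : Array (List Int) :=
  (PySem.List.pyRange 1 ((Nat.sqrt n.toNat : Int) + 1) 1).foldl (pvIStep n) (pvDp0 n)

def group_bag_unlimited (nums : List Int) : List Int :=
  match PySem.List.max? nums (fun x => x) with
  | none => []        -- Python: max([]) raises ValueError (excluded by Pre_)
  | some n =>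
    let dpL := (pvDpF n).toList
    nums.map (fun num => ((PySem.List.pyGet? dpL num).getD []).sum)

-- ===== PORT B =====
-- counts is a Python list; ported as Array Int for the same O(1) in-place updates.
-- emit(s, hi, k): tally every non-increasing chain of 1..k further positive squares
-- (next part ≤ hi) appended onto a partial decomposition of sum s.  The written
-- index s + a*a is provably in range (a ≤ isqrt(n - s)), so getD/setIfInBounds are exact.
def pvEmit (n : Int) (k : Nat) (s hi : Int) (cs : Array Int) : Array Int :=
  match k with
  | 0 => cs
  | k' + 1 =>
    (PySem.List.pyRange 1 (min hi ((Nat.sqrt (n - s).toNat : Int)) + 1) 1).foldl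
      (fun cs a =>
        let t := s + a * a
        pvEmit n k' t a (cs.setIfInBounds t.toNat (cs.getD t.toNat 0 + 1))) cs

-- counts = [0]*(n+1); counts[0] = 1  (raises IndexError for n < 0, like A: excluded by Pre_)
def pvCounts0 (n : Int) : Array Int := (Array.replicate (n + 1).toNat (0 : Int)).setIfInBounds 0 1

def pvCountsF (n : Int) : Array Int := pvEmit n 4 0 ((Nat.sqrt n.toNat : Int)) (pvCounts0 n)

def group_bag_unlimited_alt (nums : List Int) : List Int :=
  match PySem.List.max? nums (fun x => x) with
  | none => []        -- Python: max([]) raises ValueError (excluded by Pre_)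
  | some n =>
    let csL := (pvCountsF n).toList
    nums.map (fun num => (PySem.List.pyGet? csL num).getD 0)

-- ===== PRECONDITION & SPEC =====
-- Pre_ excludes exactly the inputs where Python A raises: the empty list (max
-- raises ValueError), lists whose maximum M is negative (dp[0][0] raises
-- IndexError on the empty table), and lists containing some num < -(M+1)
-- (dp[num] raises IndexError).  B raises on exactly the same inputs.
def Pre_group_bag_unlimited (nums : List Int) : Prop :=
  ∃ M ∈ nums, (∀ x ∈ nums, x ≤ M) ∧ 0 ≤ M ∧ (∀ x ∈ nums, -(M + 1) ≤ x)
instance (nums : List Int) : Decidable (Pre_group_bag_unlimited nums) := by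
  unfold Pre_group_bag_unlimited; infer_instance

def pvWitness_group_bag_unlimited : List Int := [5, 2, 0, -1]

def Spec_group_bag_unlimited (nums : List Int) (out : List Int) : Prop := out = group_bag_unlimited_alt nums
instance (nums : List Int) (out : List Int) : Decidable (Spec_group_bag_unlimited nums out) := by unfold Spec_group_bag_unlimited; infer_instance

-- ===== CLAIM (what is proved, stated in full; the proofs are below) =====
def Claim_equal_group_bag_unlimited : Prop := ∀ (nums : List Int), Dom_group_bag_unlimited nums → Pre_group_bag_unlimited nums → Spec_group_bag_unlimited nums (group_bag_unlimited nums)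

-- ===== LEMMAS AND PROOFS =====

-- generic getD/set helpers
theorem pv_getD_eq_getElem {A : Type} (l : List A) (k : Nat) (d : A) (hk : k < l.length) :
    l.getD k d = l[k] := by
  simp [List.getD_eq_getElem?_getD, List.getElem?_eq_getElem hk]

theorem pv_set_getD_self {A : Type} (l : List A) (k : Nat) (d : A) (hk : k < l.length) :
    l.set k (l.getD k d) = l := by
  apply List.ext_getElem (by simp)
  intro i h1 h2
  rw [List.getElem_set]
  split
  · subst i; rw [pv_getD_eq_getElem _ _ _ hk]
  · rfl

theorem pv_getD_set_self {A : Type} (l : List A) (k : Nat) (v d : A) (hk : k < l.length) :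
    (l.set k v).getD k d = v := by
  rw [pv_getD_eq_getElem _ _ _ (by simpa using hk), List.getElem_set, if_pos rfl]

theorem pv_getD_set_ne {A : Type} (l : List A) (k m : Nat) (v d : A) (h : k ≠ m) :
    (l.set k v).getD m d = l.getD m d := by
  simp [List.getD_eq_getElem?_getD, List.getElem?_set_ne h]

theorem pv_getD_map_range {A : Type} (f : Nat → A) (rows J : Nat) (d : A) (h : J < rows) :
    ((List.range rows).map f).getD J d = f J := by
  rw [pv_getD_eq_getElem _ _ _ (by simpa using h)]
  simp


-- List-level models of the ports' loop bodies (same values; used only in proofs)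
def pvKStepL (x j : Int) (dp : List (List Int)) (k : Int) : List (List Int) :=
  if (dp.getD (j - x).toNat []).getD (k - 1).toNat 0 ≠ 0 then
    dp.set j.toNat ((dp.getD j.toNat []).set k.toNat
      ((dp.getD j.toNat []).getD k.toNat 0 + (dp.getD (j - x).toNat []).getD (k - 1).toNat 0))
  else dp

def pvJStepL (x : Int) (dp : List (List Int)) (j : Int) : List (List Int) :=
  (PySem.List.pyRange 1 5 1).foldl (pvKStepL x j) dp

def pvIStepL (n : Int) (dp : List (List Int)) (i : Int) : List (List Int) :=
  let x := i * i
  (PySem.List.pyRange x (n + 1) 1).foldl (pvJStepL x) dp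

def pvDp0L (n : Int) : List (List Int) :=
  (List.replicate (n + 1).toNat (List.replicate 5 (0 : Int))).set 0
    ((List.replicate 5 (0 : Int)).set 0 1)

def pvDpFL (n : Int) : List (List Int) :=
  (PySem.List.pyRange 1 ((Nat.sqrt n.toNat : Int) + 1) 1).foldl (pvIStepL n) (pvDp0L n)

def pvEmitL (n : Int) (k : Nat) (s hi : Int) (cs : List Int) : List Int :=
  match k with
  | 0 => cs
  | k' + 1 =>
    (PySem.List.pyRange 1 (min hi ((Nat.sqrt (n - s).toNat : Int)) + 1) 1).foldl
      (fun cs a =>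
        let t := s + a * a
        pvEmitL n k' t a (cs.set t.toNat (cs.getD t.toNat 0 + 1))) cs

def pvCounts0L (n : Int) : List Int := (List.replicate (n + 1).toNat (0 : Int)).set 0 1

def pvCountsFL (n : Int) : List Int := pvEmitL n 4 0 ((Nat.sqrt n.toNat : Int)) (pvCounts0L n)

-- Array → List bridges: the ports compute the list models elementwise
theorem pv_arr_getD {A : Type} (a : Array A) (i : Nat) (d : A) : a.getD i d = a.toList.getD i d := by
  unfold Array.getD
  split
  · next h =>
    rw [pv_getD_eq_getElem _ _ _ (by simpa using h), Array.getElem_toList]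
    rfl
  · next h =>
    rw [List.getD_eq_getElem?_getD, List.getElem?_eq_none (by simpa using h)]
    rfl

theorem pv_arr_set {A : Type} (a : Array A) (i : Nat) (v : A) :
    (a.setIfInBounds i v).toList = a.toList.set i v := Array.toList_setIfInBounds ..

theorem pv_foldl_toList {A B : Type} (f : Array A → B → Array A) (g : List A → B → List A)
    (h : ∀ a b, (f a b).toList = g a.toList b) : ∀ (l : List B) (a : Array A),
    (l.foldl f a).toList = l.foldl g a.toList := by
  intro l
  induction l with
  | nil => intro a; rfl
  | cons b l ihl => intro a; rw [List.foldl_cons, List.foldl_cons, ihl, h]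

theorem pvKStep_toList (x j : Int) (dp : Array (List Int)) (k : Int) :
    (pvKStep x j dp k).toList = pvKStepL x j dp.toList k := by
  unfold pvKStep pvKStepL
  rw [pv_arr_getD]
  split
  · rw [pv_arr_set, pv_arr_getD]
  · rfl

theorem pvJStep_toList (x : Int) (dp : Array (List Int)) (j : Int) :
    (pvJStep x dp j).toList = pvJStepL x dp.toList j :=
  pv_foldl_toList _ _ (fun a b => pvKStep_toList x j a b) _ dp

theorem pvIStep_toList (n : Int) (dp : Array (List Int)) (i : Int) :
    (pvIStep n dp i).toList = pvIStepL n dp.toList i :=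
  pv_foldl_toList _ _ (fun a b => pvJStep_toList (i * i) a b) _ dp

theorem pvDp0_toList (n : Int) : (pvDp0 n).toList = pvDp0L n := by
  unfold pvDp0 pvDp0L
  rw [pv_arr_set, Array.toList_replicate]

theorem pvDpF_toList (n : Int) : (pvDpF n).toList = pvDpFL n := by
  unfold pvDpF pvDpFL
  rw [pv_foldl_toList _ _ (fun a b => pvIStep_toList n a b), pvDp0_toList]

theorem pvEmit_toList (n : Int) : ∀ (k : Nat) (s hi : Int) (cs : Array Int),
    (pvEmit n k s hi cs).toList = pvEmitL n k s hi cs.toList := by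
  intro k
  induction k with
  | zero => intro s hi cs; rfl
  | succ k ih =>
    intro s hi cs
    show (List.foldl _ cs _).toList = List.foldl _ cs.toList _
    refine pv_foldl_toList _ _ ?_ _ cs
    intro a b
    show (pvEmit n k (s + b * b) b (a.setIfInBounds (s + b * b).toNat (a.getD (s + b * b).toNat 0 + 1))).toList
        = pvEmitL n k (s + b * b) b (a.toList.set (s + b * b).toNat (a.toList.getD (s + b * b).toNat 0 + 1))
    rw [ih, pv_arr_set, pv_arr_getD]

theorem pvCountsF_toList (n : Int) : (pvCountsF n).toList = pvCountsFL n := by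
  unfold pvCountsF pvCountsFL pvCounts0 pvCounts0L
  rw [pvEmit_toList, pv_arr_set, Array.toList_replicate]


-- functional model of A's table: pvD i j k = dp[j][k] after the outer passes 1..i
def pvDstep (prev : Nat → Nat → Int) (x : Nat) : Nat → Nat → Int
  | j, 0 => prev j 0
  | j, k + 1 => prev j (k + 1) + (if x ≤ j then pvDstep prev x (j - x) k else 0)

def pvD : Nat → Nat → Nat → Int
  | 0 => fun j k => if j = 0 ∧ k = 0 then 1 else 0
  | i + 1 => pvDstep (pvD i) ((i + 1) * (i + 1))

-- number of non-increasing chains of exactly k positive parts, first part ≤ hi,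
-- squares summing to t
def pvV : Nat → Nat → Nat → Int
  | 0, _, t => if t = 0 then 1 else 0
  | k + 1, hi, t => (Finset.range hi).sum fun r =>
      if (r + 1) * (r + 1) ≤ t then pvV k (r + 1) (t - (r + 1) * (r + 1)) else 0

def pvSW (K hi t : Nat) : Int := (Finset.range K).sum fun l => pvV (l + 1) hi t

-- functional model of B's tallies: contribution of pvEmitL to counts[j]
def pvW (n : Nat) : Nat → Nat → Nat → Nat → Int
  | 0, _, _, _ => 0
  | k + 1, s, hi, j => (Finset.range (min hi (Nat.sqrt (n - s)))).sum fun r =>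
      (if s + (r + 1) * (r + 1) = j then 1 else 0) +
        pvW n k (s + (r + 1) * (r + 1)) (r + 1) j

theorem pvV_trunc (k h t : Nat) : pvV k h t = pvV k (min h (Nat.sqrt t)) t := by
  cases k with
  | zero => rfl
  | succ k =>
    simp only [pvV]
    refine (Finset.sum_subset ?_ ?_).symm
    · intro r hr
      simp only [Finset.mem_range] at *
      omega
    intro r hr hnr
    simp only [Finset.mem_range] at hr hnr
    have : ¬ (r + 1) * (r + 1) ≤ t := by
      intro hle
      have := Nat.le_sqrt.mpr hle
      omega
    simp [this]

theorem pvV_split (k i j : Nat) :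
    pvV (k + 1) (i + 1) j = pvV (k + 1) i j +
      (if (i + 1) * (i + 1) ≤ j then pvV k (i + 1) (j - (i + 1) * (i + 1)) else 0) := by
  simp only [pvV, Finset.sum_range_succ]

theorem pvD_eq_pvV (i : Nat) : ∀ k j, pvD i j k = pvV k i j := by
  induction i with
  | zero =>
    intro k j
    cases k with
    | zero => simp [pvD, pvV]
    | succ k => simp [pvD, pvV]
  | succ i ih =>
    intro k
    induction k with
    | zero =>
      intro j
      rw [show pvD (i + 1) j 0 = pvD i j 0 from rfl, ih 0 j]
      rfl
    | succ k ihk =>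
      intro j
      rw [show pvD (i + 1) j (k + 1) = pvD i j (k + 1) +
            (if (i + 1) * (i + 1) ≤ j then pvD (i + 1) (j - (i + 1) * (i + 1)) k else 0) from rfl]
      rw [ih (k + 1) j, pvV_split k i j]
      congr 1
      split
      · exact ihk _
      · rfl

theorem pvD_zero (i j : Nat) : pvD i j 0 = if j = 0 then 1 else 0 := by
  rw [pvD_eq_pvV]; rfl

theorem pvD_stable (i j k : Nat) (h : ¬ (i + 1) * (i + 1) ≤ j) :
    pvD (i + 1) j k = pvD i j k := by
  cases k with
  | zero => rfl
  | succ k =>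
    show pvD i j (k + 1) + _ = _
    rw [if_neg h, add_zero]

theorem pvSW_trunc (k a c' t : Nat) (h : Nat.sqrt t ≤ c') :
    pvSW k (min a c') t = pvSW k a t := by
  unfold pvSW
  refine Finset.sum_congr rfl fun l _ => ?_
  rw [pvV_trunc _ (min a c') t, pvV_trunc _ a t]
  congr 1
  omega

theorem pvSW_succ (k c t0 : Nat) :
    pvSW (k + 1) c t0 = (Finset.range c).sum (fun r =>
      (if (r + 1) * (r + 1) ≤ t0 then pvSW k (r + 1) (t0 - (r + 1) * (r + 1)) else 0) +
      (if t0 = (r + 1) * (r + 1) then (1 : Int) else 0)) := by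
  unfold pvSW
  have h1 : ∀ l ∈ Finset.range (k + 1), pvV (l + 1) c t0 =
      (Finset.range c).sum (fun r =>
        if (r + 1) * (r + 1) ≤ t0 then pvV l (r + 1) (t0 - (r + 1) * (r + 1)) else 0) :=
    fun l _ => by simp only [pvV]
  rw [Finset.sum_congr rfl h1, Finset.sum_comm]
  refine Finset.sum_congr rfl fun r hr => ?_
  rw [Finset.sum_range_succ']
  congr 1
  · by_cases hc : (r + 1) * (r + 1) ≤ t0
    · simp [hc]
    · simp [hc]
  · show (if _ then pvV 0 (r + 1) (t0 - (r + 1) * (r + 1)) else 0) = _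
    simp only [pvV]
    split_ifs <;> omega

theorem pvW_eq (n : Nat) : ∀ (k s hi j : Nat), j ≤ n →
    pvW n k s hi j = if s ≤ j then pvSW k (min hi (Nat.sqrt (n - s))) (j - s) else 0 := by
  intro k
  induction k with
  | zero => intro s hi j hj; simp [pvW, pvSW]
  | succ k ih =>
    intro s hi j hj
    by_cases hs : s ≤ j
    · rw [if_pos hs, pvSW_succ]
      simp only [pvW]
      refine Finset.sum_congr rfl fun r hr => ?_
      rw [ih (s + (r + 1) * (r + 1)) (r + 1) j hj]
      by_cases hle : s + (r + 1) * (r + 1) ≤ j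
      · have h2 : (r + 1) * (r + 1) ≤ j - s := by omega
        rw [if_pos hle, if_pos h2]
        have htr : pvSW k (min (r + 1) (Nat.sqrt (n - (s + (r + 1) * (r + 1)))))
            (j - (s + (r + 1) * (r + 1))) = pvSW k (r + 1) (j - (s + (r + 1) * (r + 1))) :=
          pvSW_trunc _ _ _ _ (Nat.sqrt_le_sqrt (by omega))
        rw [htr]
        have he : j - (s + (r + 1) * (r + 1)) = j - s - (r + 1) * (r + 1) := by omega
        rw [he, add_comm]
        congr 1
        split_ifs <;> omega
      · rw [if_neg hle, if_neg (by omega : ¬ s + (r + 1) * (r + 1) = j),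
            if_neg (by omega : ¬ (r + 1) * (r + 1) ≤ j - s),
            if_neg (by omega : ¬ j - s = (r + 1) * (r + 1))]
    · rw [if_neg hs]
      simp only [pvW]
      refine Finset.sum_eq_zero fun r hr => ?_
      rw [ih _ _ j hj, if_neg (by omega), if_neg (by omega)]
      simp


-- list-of-lists view of the model table
def pvRow (i j : Nat) : List Int := [pvD i j 0, pvD i j 1, pvD i j 2, pvD i j 3, pvD i j 4]

def pvTab (rows i : Nat) : List (List Int) := (List.range rows).map (pvRow i)

-- hybrid state in the middle of pass i+1: rows below J already updated
def pvHyb (rows i J : Nat) : List (List Int) :=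
  (List.range rows).map (fun j => if j < J then pvRow (i + 1) j else pvRow i j)

theorem pvHyb_start (rows i x : Nat) (hx : x = (i + 1) * (i + 1)) :
    pvHyb rows i x = pvTab rows i := by
  unfold pvHyb pvTab
  refine List.map_congr_left fun j hj => ?_
  split
  · next h =>
    -- j < x: row unchanged by pass i+1
    have hn : ¬ (i + 1) * (i + 1) ≤ j := by omega
    simp [pvRow, pvD_stable _ _ _ hn]
  · rfl

theorem pvHyb_stop (rows i : Nat) : pvHyb rows i rows = pvTab rows (i + 1) := by
  unfold pvHyb pvTab
  refine List.map_congr_left fun j hj => ?_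
  rw [if_pos (List.mem_range.mp hj)]

-- one k-step in the canonical (always-add) form: skipping a zero addend is a no-op
theorem pv_kstep_eq (dp : List (List Int)) (x j : Int) (hj : j.toNat < dp.length)
    (hrow5 : (dp.getD j.toNat []).length = 5) (k : Int) (hk : 1 ≤ k) (hk4 : k ≤ 4) :
    pvKStepL x j dp k = dp.set j.toNat ((dp.getD j.toNat []).set k.toNat
      ((dp.getD j.toNat []).getD k.toNat 0 + (dp.getD (j - x).toNat []).getD (k - 1).toNat 0)) := by
  unfold pvKStepL
  by_cases hv : (dp.getD (j - x).toNat []).getD (k - 1).toNat 0 = 0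
  · rw [if_neg (by simpa using hv), hv, add_zero,
      pv_set_getD_self _ _ _ (by omega : k.toNat < (dp.getD j.toNat []).length),
      pv_set_getD_self _ _ _ hj]
  · rw [if_pos (by simpa using hv)]

-- the four k-steps update row j from row j-x
theorem pv_kfold (dp : List (List Int)) (x j : Int) (h1 : 1 ≤ x) (h2 : x ≤ j)
    (hj : j.toNat < dp.length)
    (o0 o1 o2 o3 o4 s0 s1 s2 s3 s4 : Int)
    (ho : dp.getD j.toNat [] = [o0, o1, o2, o3, o4])
    (hs : dp.getD (j - x).toNat [] = [s0, s1, s2, s3, s4]) :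
    pvJStepL x dp j = dp.set j.toNat [o0, o1 + s0, o2 + s1, o3 + s2, o4 + s3] := by
  have hne : (j - x).toNat ≠ j.toNat := by omega
  have hrange : PySem.List.pyRange 1 5 1 = [1, 2, 3, 4] := by decide
  have hrow5 : (dp.getD j.toNat []).length = 5 := by rw [ho]; rfl
  have e1 : pvKStepL x j dp 1 = dp.set j.toNat [o0, o1 + s0, o2, o3, o4] := by
    rw [pv_kstep_eq dp x j hj hrow5 1 (by norm_num) (by norm_num), ho, hs]; rfl
  set dp1 := dp.set j.toNat [o0, o1 + s0, o2, o3, o4] with hdp1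
  have hj1 : j.toNat < dp1.length := by simp [hdp1]; omega
  have g1o : dp1.getD j.toNat [] = [o0, o1 + s0, o2, o3, o4] := pv_getD_set_self _ _ _ _ hj
  have g1s : dp1.getD (j - x).toNat [] = [s0, s1, s2, s3, s4] := by
    rw [hdp1, pv_getD_set_ne _ _ _ _ _ (Ne.symm hne), hs]
  have e2 : pvKStepL x j dp1 2 = dp1.set j.toNat [o0, o1 + s0, o2 + s1, o3, o4] := by
    rw [pv_kstep_eq dp1 x j hj1 (by rw [g1o]; rfl) 2 (by norm_num) (by norm_num), g1o, g1s]; rfl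
  set dp2 := dp1.set j.toNat [o0, o1 + s0, o2 + s1, o3, o4] with hdp2
  have hj2 : j.toNat < dp2.length := by simp [hdp2]; rw [hdp1]; simp; omega
  have g2o : dp2.getD j.toNat [] = [o0, o1 + s0, o2 + s1, o3, o4] := pv_getD_set_self _ _ _ _ hj1
  have g2s : dp2.getD (j - x).toNat [] = [s0, s1, s2, s3, s4] := by
    rw [hdp2, pv_getD_set_ne _ _ _ _ _ (Ne.symm hne), g1s]
  have e3 : pvKStepL x j dp2 3 = dp2.set j.toNat [o0, o1 + s0, o2 + s1, o3 + s2, o4] := by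
    rw [pv_kstep_eq dp2 x j hj2 (by rw [g2o]; rfl) 3 (by norm_num) (by norm_num), g2o, g2s]; rfl
  set dp3 := dp2.set j.toNat [o0, o1 + s0, o2 + s1, o3 + s2, o4] with hdp3
  have hj3 : j.toNat < dp3.length := by simp [hdp3, hdp2, hdp1]; omega
  have g3o : dp3.getD j.toNat [] = [o0, o1 + s0, o2 + s1, o3 + s2, o4] := pv_getD_set_self _ _ _ _ hj2
  have g3s : dp3.getD (j - x).toNat [] = [s0, s1, s2, s3, s4] := by
    rw [hdp3, pv_getD_set_ne _ _ _ _ _ (Ne.symm hne), g2s]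
  have e4 : pvKStepL x j dp3 4 = dp3.set j.toNat [o0, o1 + s0, o2 + s1, o3 + s2, o4 + s3] := by
    rw [pv_kstep_eq dp3 x j hj3 (by rw [g3o]; rfl) 4 (by norm_num) (by norm_num), g3o, g3s]; rfl
  unfold pvJStepL
  rw [hrange]
  simp only [List.foldl]
  rw [e1, e2, e3, e4, hdp3, hdp2, hdp1]
  simp only [List.set_set]


theorem pvRow_succ (i J X : Nat) (hX : X = (i + 1) * (i + 1)) (hxJ : X ≤ J) :
    [pvD i J 0, pvD i J 1 + pvD (i + 1) (J - X) 0, pvD i J 2 + pvD (i + 1) (J - X) 1,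
     pvD i J 3 + pvD (i + 1) (J - X) 2, pvD i J 4 + pvD (i + 1) (J - X) 3] = pvRow (i + 1) J := by
  subst hX
  have hk : ∀ k, pvD (i + 1) J (k + 1) =
      pvD i J (k + 1) + pvD (i + 1) (J - (i + 1) * (i + 1)) k := fun k => by
    rw [show pvD (i + 1) J (k + 1) = pvD i J (k + 1) +
      (if (i + 1) * (i + 1) ≤ J then pvD (i + 1) (J - (i + 1) * (i + 1)) k else 0) from rfl,
      if_pos hxJ]
  unfold pvRow
  rw [show pvD (i + 1) J 0 = pvD i J 0 from rfl, hk 0, hk 1, hk 2, hk 3]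

theorem pvHyb_set (rows i J : Nat) (_hJ : J < rows) :
    (pvHyb rows i J).set J (pvRow (i + 1) J) = pvHyb rows i (J + 1) := by
  apply List.ext_getElem (by simp [pvHyb])
  intro m h1 h2
  rw [List.getElem_set]
  have hm : m < rows := by simpa [pvHyb] using h2
  unfold pvHyb
  split
  · next heq =>
    rw [List.getElem_map, List.getElem_range, if_pos (by omega)]
    rw [← heq]
  · next hne =>
    rw [List.getElem_map, List.getElem_map]
    simp only [List.getElem_range]
    by_cases hmJ : m < J
    · rw [if_pos hmJ, if_pos (by omega)]
    · rw [if_neg hmJ, if_neg (by omega)]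

theorem pv_jstep (rows i J X : Nat) (hX : X = (i + 1) * (i + 1)) (hxJ : X ≤ J) (hJ : J < rows) :
    pvJStepL (X : Int) (pvHyb rows i J) (J : Int) = pvHyb rows i (J + 1) := by
  have hX1 : (1 : Int) ≤ (X : Int) := by
    have h1 : 0 < (i + 1) * (i + 1) := Nat.mul_pos (Nat.succ_pos i) (Nat.succ_pos i)
    have : 1 ≤ X := by omega
    exact_mod_cast this
  have hlen : (pvHyb rows i J).length = rows := by simp [pvHyb]
  have htN : ((J : Int)).toNat = J := by omega
  have ho : (pvHyb rows i J).getD ((J : Int)).toNat [] = pvRow i J := by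
    rw [htN]
    unfold pvHyb
    rw [pv_getD_map_range _ _ _ _ hJ, if_neg (lt_irrefl J)]
  have hsN : ((J : Int) - (X : Int)).toNat = J - X := by omega
  have hs : (pvHyb rows i J).getD ((J : Int) - (X : Int)).toNat [] = pvRow (i + 1) (J - X) := by
    rw [hsN]
    unfold pvHyb
    rw [pv_getD_map_range _ _ _ _ (by omega), if_pos (by omega : J - X < J)]
  rw [pv_kfold (pvHyb rows i J) (X : Int) (J : Int) hX1 (by exact_mod_cast hxJ)
      (by rw [hlen, htN]; exact hJ)
      (pvD i J 0) (pvD i J 1) (pvD i J 2) (pvD i J 3) (pvD i J 4)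
      (pvD (i + 1) (J - X) 0) (pvD (i + 1) (J - X) 1) (pvD (i + 1) (J - X) 2)
      (pvD (i + 1) (J - X) 3) (pvD (i + 1) (J - X) 4) ho hs]
  rw [htN, pvRow_succ i J X hX hxJ, pvHyb_set rows i J hJ]

theorem pv_jloop (rows i X : Nat) (hX : X = (i + 1) * (i + 1)) : ∀ (p : Nat), X + p ≤ rows →
    ((List.range p).map (fun (r : Nat) => (X : Int) + (r : Int))).foldl (pvJStepL (X : Int)) (pvHyb rows i X)
      = pvHyb rows i (X + p) := by
  intro p
  induction p with
  | zero => intro _; simp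
  | succ p ih =>
    intro hp
    rw [List.range_succ, List.map_append, List.foldl_append, ih (by omega)]
    simp only [List.map_cons, List.map_nil, List.foldl_cons, List.foldl_nil]
    have hcast : (X : Int) + (p : Int) = ((X + p : Nat) : Int) := by push_cast; ring
    rw [hcast, pv_jstep rows i (X + p) X hX (by omega) (by omega)]
    rfl

theorem pv_ipass (n : Int) (hn : 0 ≤ n) (i : Nat) (hx : (i + 1) * (i + 1) ≤ n.toNat) :
    pvIStepL n (pvTab (n.toNat + 1) i) ((i + 1 : Nat) : Int) = pvTab (n.toNat + 1) (i + 1) := by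
  show (PySem.List.pyRange (((i + 1 : Nat) : Int) * ((i + 1 : Nat) : Int)) (n + 1) 1).foldl
      (pvJStepL (((i + 1 : Nat) : Int) * ((i + 1 : Nat) : Int))) (pvTab (n.toNat + 1) i)
      = pvTab (n.toNat + 1) (i + 1)
  have hxx : ((i + 1 : Nat) : Int) * ((i + 1 : Nat) : Int) = (((i + 1) * (i + 1) : Nat) : Int) := by
    push_cast; ring
  rw [hxx, PySem.List.pyRange_one]
  have hcnt : ((n + 1) - (((i + 1) * (i + 1) : Nat) : Int)).toNat
      = n.toNat + 1 - (i + 1) * (i + 1) := by omega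
  rw [hcnt, ← pvHyb_start (n.toNat + 1) i ((i + 1) * (i + 1)) rfl,
    pv_jloop (n.toNat + 1) i ((i + 1) * (i + 1)) rfl (n.toNat + 1 - (i + 1) * (i + 1)) (by omega)]
  rw [show (i + 1) * (i + 1) + (n.toNat + 1 - (i + 1) * (i + 1)) = n.toNat + 1 from by omega,
    pvHyb_stop]

theorem pv_dp0 (n : Int) (hn : 0 ≤ n) :
    (List.replicate (n + 1).toNat (List.replicate 5 (0 : Int))).set 0
        ((List.replicate 5 (0 : Int)).set 0 1)
      = pvTab (n.toNat + 1) 0 := by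
  rw [show (n + 1).toNat = n.toNat + 1 from by omega]
  apply List.ext_getElem (by simp [pvTab])
  intro m h1 h2
  rw [List.getElem_set]
  have hm : m < n.toNat + 1 := by simpa using h1
  unfold pvTab
  rw [List.getElem_map, List.getElem_range]
  split
  · next h =>
    have : m = 0 := h.symm
    subst this
    decide
  · next h =>
    rw [List.getElem_replicate]
    have hm0 : ¬ (m = 0) := fun hc => h hc.symm
    simp [pvRow, pvD, hm0]

theorem pv_outer (n : Int) (hn : 0 ≤ n) :
    ∀ (I : Nat), I ≤ Nat.sqrt n.toNat →
    (PySem.List.pyRange 1 ((I : Int) + 1) 1).foldl (pvIStepL n)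
        (pvTab (n.toNat + 1) 0) = pvTab (n.toNat + 1) I := by
  intro I
  induction I with
  | zero => intro _; rw [PySem.List.pyRange_one_eq_nil (by norm_num), List.foldl_nil]
  | succ I ih =>
    intro hI
    rw [show ((I + 1 : Nat) : Int) + 1 = ((I : Int) + 1) + 1 from by push_cast; ring,
      PySem.List.pyRange_one_succ_right (by omega), List.foldl_append, ih (by omega)]
    simp only [List.foldl_cons, List.foldl_nil]
    rw [show ((I : Int) + 1) = ((I + 1 : Nat) : Int) from by push_cast; ring,
      pv_ipass n hn I (Nat.le_sqrt.mp hI)]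


theorem pvEmit_length (n : Int) : ∀ (k : Nat) (s hi : Int) (cs : List Int),
    (pvEmitL n k s hi cs).length = cs.length := by
  intro k
  induction k with
  | zero => intro s hi cs; rfl
  | succ k ih =>
    intro s hi cs
    show (List.foldl _ cs _).length = cs.length
    generalize (PySem.List.pyRange 1 (min hi ((Nat.sqrt (n - s).toNat : Int)) + 1) 1) = l
    induction l generalizing cs with
    | nil => rfl
    | cons a l ihl =>
      rw [List.foldl_cons, ihl, ih]
      simp

theorem pv_body_fold_length (n : Int) (k : Nat) : ∀ (l : List Int) (cs : List Int),
    (l.foldl (fun cs a =>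
      pvEmitL n k (s + a * a) a (cs.set (s + a * a).toNat (cs.getD (s + a * a).toNat 0 + 1))) cs).length
      = cs.length := by
  intro l
  induction l with
  | nil => intro cs; rfl
  | cons a l ihl =>
    intro cs
    rw [List.foldl_cons, ihl, pvEmit_length]
    simp

theorem pvEmit_getD (n : Int) (hn : 0 ≤ n) : ∀ (k : Nat) (s hi : Int), 0 ≤ s → s ≤ n → 0 ≤ hi →
    ∀ (cs : List Int), cs.length = n.toNat + 1 → ∀ (j : Nat),
    (pvEmitL n k s hi cs).getD j 0 = cs.getD j 0 + pvW n.toNat k s.toNat hi.toNat j := by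
  intro k
  induction k with
  | zero => intro s hi _ _ _ cs _ j; simp [pvEmitL, pvW]
  | succ k ih =>
    intro s hi hs0 hsn hhi cs hcs j
    have hrange : PySem.List.pyRange 1 (min hi ((Nat.sqrt (n - s).toNat : Int)) + 1) 1
        = (List.range (min hi.toNat (Nat.sqrt (n.toNat - s.toNat)))).map
            (fun (r : Nat) => (1 : Int) + (r : Int)) := by
      rw [PySem.List.pyRange_one]
      congr 1
      rw [show (n - s).toNat = n.toNat - s.toNat from by omega, add_sub_cancel_right]
      generalize Nat.sqrt (n.toNat - s.toNat) = A
      congr 1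
      omega
    rw [show pvEmitL n (k + 1) s hi cs =
        (PySem.List.pyRange 1 (min hi ((Nat.sqrt (n - s).toNat : Int)) + 1) 1).foldl
          (fun cs a =>
            pvEmitL n k (s + a * a) a (cs.set (s + a * a).toNat (cs.getD (s + a * a).toNat 0 + 1))) cs
        from rfl, hrange]
    suffices h : ∀ c0 : Nat, c0 ≤ min hi.toNat (Nat.sqrt (n.toNat - s.toNat)) →
        (((List.range c0).map (fun (r : Nat) => (1 : Int) + (r : Int))).foldl
          (fun cs a =>
            pvEmitL n k (s + a * a) a (cs.set (s + a * a).toNat (cs.getD (s + a * a).toNat 0 + 1))) cs).getD j 0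
        = cs.getD j 0 + (Finset.range c0).sum (fun r =>
            (if s.toNat + (r + 1) * (r + 1) = j then (1 : Int) else 0) +
              pvW n.toNat k (s.toNat + (r + 1) * (r + 1)) (r + 1) j) by
      rw [h _ (le_refl _)]
      rfl
    intro c0
    induction c0 with
    | zero => intro _; simp
    | succ c0 ihc =>
      intro hc0
      rw [List.range_succ, List.map_append, List.foldl_append, Finset.sum_range_succ]
      simp only [List.map_cons, List.map_nil, List.foldl_cons, List.foldl_nil]
      have hsq : (c0 + 1) * (c0 + 1) ≤ n.toNat - s.toNat := by
        have h1 : c0 + 1 ≤ Nat.sqrt (n.toNat - s.toNat) := by omega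
        have := Nat.le_sqrt.mp h1
        omega
      have ha : (1 : Int) + (c0 : Int) = ((c0 + 1 : Nat) : Int) := by push_cast; ring
      rw [ha]
      have hqc : ((c0 + 1 : Nat) : Int) * ((c0 + 1 : Nat) : Int) = (((c0 + 1) * (c0 + 1) : Nat) : Int) := by
        push_cast; ring
      rw [hqc]
      generalize hq : (c0 + 1) * (c0 + 1) = q at hsq ⊢
      set acc := ((List.range c0).map (fun (r : Nat) => (1 : Int) + (r : Int))).foldl
          (fun cs a =>
            pvEmitL n k (s + a * a) a (cs.set (s + a * a).toNat (cs.getD (s + a * a).toNat 0 + 1))) cs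
        with hacc
      have hlacc : acc.length = n.toNat + 1 := by rw [hacc, pv_body_fold_length, hcs]
      have htt : (s + ((q : Nat) : Int)).toNat = s.toNat + q := by omega
      have htn : s + ((q : Nat) : Int) ≤ n := by omega
      have ht0 : 0 ≤ s + ((q : Nat) : Int) := by omega
      have hset : (acc.set (s + ((q : Nat) : Int)).toNat
          ((acc.getD (s + ((q : Nat) : Int)).toNat 0) + 1)).length = n.toNat + 1 := by
        rw [List.length_set, hlacc]
      rw [ih _ _ ht0 htn (by positivity) _ hset j]
      have hidx : (s + ((q : Nat) : Int)).toNat < acc.length := by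
        rw [hlacc]
        omega
      have htoNat : ((c0 + 1 : Nat) : Int).toNat = c0 + 1 := by omega
      rw [htoNat]
      by_cases hj : j = s.toNat + q
      · rw [show (acc.set (s + ((q : Nat) : Int)).toNat
            ((acc.getD (s + ((q : Nat) : Int)).toNat 0) + 1)).getD j 0
            = acc.getD j 0 + 1 from by
          rw [show j = (s + ((q : Nat) : Int)).toNat from by omega]
          exact pv_getD_set_self _ _ _ _ hidx]
        rw [ihc (by omega), if_pos (by omega), htt]
        ring
      · rw [show (acc.set (s + ((q : Nat) : Int)).toNat
            ((acc.getD (s + ((q : Nat) : Int)).toNat 0) + 1)).getD j 0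
            = acc.getD j 0 from by
          rw [pv_getD_set_ne _ _ _ _ _ (by omega)]]
        rw [ihc (by omega), if_neg (by omega), htt]
        ring

theorem pv_counts0 (n : Int) (hn : 0 ≤ n) (j : Nat) :
    ((List.replicate (n + 1).toNat (0 : Int)).set 0 1).getD j 0 = if j = 0 then 1 else 0 := by
  rw [show (n + 1).toNat = n.toNat + 1 from by omega]
  by_cases hj : j = 0
  · subst hj
    rw [if_pos rfl]
    exact pv_getD_set_self (List.replicate (n.toNat + 1) (0 : Int)) 0 1 0 (by simp)
  · rw [pv_getD_set_ne _ _ _ _ _ (fun hc => hj hc.symm), if_neg hj]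
    rcases Nat.lt_or_ge j (n.toNat + 1) with h | h
    · rw [pv_getD_eq_getElem _ _ _ (by simpa using h), List.getElem_replicate]
    · rw [List.getD_eq_getElem?_getD, List.getElem?_eq_none (by simpa using h)]
      rfl

theorem pv_rowsum (m j : Nat) :
    (pvRow m j).sum = (if j = 0 then (1 : Int) else 0) + pvSW 4 m j := by
  unfold pvRow pvSW
  rw [pvD_zero, pvD_eq_pvV m 1 j, pvD_eq_pvV m 2 j, pvD_eq_pvV m 3 j, pvD_eq_pvV m 4 j,
    Finset.sum_range_succ, Finset.sum_range_succ, Finset.sum_range_succ, Finset.sum_range_succ,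
    Finset.sum_range_zero]
  simp only [List.sum_cons, List.sum_nil]
  ring

theorem pv_counts_eq (n : Int) (hn : 0 ≤ n) :
    pvEmitL n 4 0 ((Nat.sqrt n.toNat : Int)) ((List.replicate (n + 1).toNat (0 : Int)).set 0 1)
      = (pvTab (n.toNat + 1) (Nat.sqrt n.toNat)).map List.sum := by
  have hc0len : ((List.replicate (n + 1).toNat (0 : Int)).set 0 1).length = n.toNat + 1 := by
    simp
    omega
  apply List.ext_getElem
  · rw [pvEmit_length, hc0len]
    simp [pvTab]
  intro m h1 h2
  have hm : m < n.toNat + 1 := by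
    have : m < (pvTab (n.toNat + 1) (Nat.sqrt n.toNat)).length := by simpa using h2
    simpa [pvTab] using this
  rw [← pv_getD_eq_getElem _ _ (0 : Int) h1, ← pv_getD_eq_getElem _ _ (0 : Int) h2]
  rw [pvEmit_getD n hn 4 0 ((Nat.sqrt n.toNat : Int)) (le_refl 0) hn (by positivity) _ hc0len m]
  rw [pv_counts0 n hn m]
  rw [show ((0 : Int)).toNat = 0 from rfl, show ((Nat.sqrt n.toNat : Int)).toNat = Nat.sqrt n.toNat from by omega]
  rw [pvW_eq n.toNat 4 0 (Nat.sqrt n.toNat) m (by omega), if_pos (Nat.zero_le m)]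
  rw [show n.toNat - 0 = n.toNat from rfl, min_self, Nat.sub_zero]
  unfold pvTab
  rw [List.map_map, pv_getD_map_range _ _ _ _ hm]
  rw [show (List.sum ∘ pvRow (Nat.sqrt n.toNat)) m = (pvRow (Nat.sqrt n.toNat) m).sum from rfl,
    pv_rowsum]

-- ===== VERDICT (by name: the statement is the Claim_ definition above) =====
theorem group_bag_unlimited_spec : Claim_equal_group_bag_unlimited := by
  intro nums _hdom hpre
  unfold Spec_group_bag_unlimited
  obtain ⟨M, hM, hMmax, hM0, hMlow⟩ := hpre
  unfold group_bag_unlimited group_bag_unlimited_alt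
  cases hmax : PySem.List.max? nums (fun x => x) with
  | none =>
    have : nums = [] := (PySem.List.max?_eq_none_iff nums (fun x => x)).mp hmax
    subst this
    cases hM
  | some n =>
    have hnmem : n ∈ nums := PySem.List.max?_mem hmax
    have hmaxle : ∀ y ∈ nums, y ≤ n := fun y hy => PySem.List.max?_isMax hmax y hy
    have hn0 : 0 ≤ n := le_trans hM0 (hmaxle M hM)
    have hlow : ∀ x ∈ nums, -(n + 1) ≤ x := by
      intro x hx
      have h1 := hmaxle M hM
      have h2 := hMlow x hx
      omega
    have hdp : (pvDpF n).toList = pvTab (n.toNat + 1) (Nat.sqrt n.toNat) := by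
      rw [pvDpF_toList]
      unfold pvDpFL pvDp0L
      rw [pv_dp0 n hn0]
      exact pv_outer n hn0 _ (le_refl _)
    have hcf : (pvCountsF n).toList = (pvTab (n.toNat + 1) (Nat.sqrt n.toNat)).map List.sum := by
      rw [pvCountsF_toList]
      unfold pvCountsFL pvCounts0L
      exact pv_counts_eq n hn0
    show nums.map (fun num => ((PySem.List.pyGet? (pvDpF n).toList num).getD []).sum)
        = nums.map (fun num => (PySem.List.pyGet? (pvCountsF n).toList num).getD 0)
    rw [hdp, hcf]
    apply List.map_congr_left
    intro num hnum
    have hlen : (pvTab (n.toNat + 1) (Nat.sqrt n.toNat)).length = n.toNat + 1 := by simp [pvTab]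
    have hup : num ≤ n := hmaxle num hnum
    have hdown : -(n + 1) ≤ num := hlow num hnum
    by_cases hnn : 0 ≤ num
    · rw [PySem.List.pyGet?_of_nonneg _ hnn, PySem.List.pyGet?_of_nonneg _ hnn]
      have hlt : num.toNat < (pvTab (n.toNat + 1) (Nat.sqrt n.toNat)).length := by
        rw [hlen]; omega
      rw [List.getElem?_eq_getElem hlt,
        List.getElem?_eq_getElem (by simpa using hlt :
          num.toNat < ((pvTab (n.toNat + 1) (Nat.sqrt n.toNat)).map List.sum).length)]
      simp
    · replace hnn : num < 0 := by omega
      have hkpos : 0 < (-num).toNat := by omega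
      have hkle : (-num).toNat ≤ (pvTab (n.toNat + 1) (Nat.sqrt n.toNat)).length := by
        rw [hlen]; omega
      have hrepr : num = -(((-num).toNat : Nat) : Int) := by omega
      rw [hrepr, PySem.List.pyGet?_neg_natCast _ _ hkpos hkle,
        PySem.List.pyGet?_neg_natCast _ _ hkpos (by simpa using hkle)]
      have hidx : (pvTab (n.toNat + 1) (Nat.sqrt n.toNat)).length - (-num).toNat
          < (pvTab (n.toNat + 1) (Nat.sqrt n.toNat)).length := by
        rw [hlen]; omega
      rw [List.getElem?_eq_getElem hidx,
        List.getElem?_eq_getElem (by simpa using hidx :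
          ((pvTab (n.toNat + 1) (Nat.sqrt n.toNat)).map List.sum).length - (-num).toNat
            < ((pvTab (n.toNat + 1) (Nat.sqrt n.toNat)).map List.sum).length)]
      simp
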